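-- pv_equiv track=rewrite | github.com/paiml/depyler | examples/hard_edge_state_machine.py | count_state_visits
-- ===== SOURCE A (Python) =====
-- def count_state_visits(input_seq: list[int], num_states: int) -> list[int]:
--     """Count how many times each state was visited."""
--     counts: list[int] = []
--     s: int = 0
--     while s < num_states:
--         counts.append(0)
--         s = s + 1
--     current_state: int = 0
--     counts[0] = 1
--     i: int = 0
--     while i < len(input_seq):
--         inp: int = input_seq[i]
--         if inp == 1:
--             current_state = current_state + 1
--             if current_state >= num_states:
--                 current_state = num_states - 1
--         elif inp == 2:
--             current_state = 0
--         elif inp == 3: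
--             current_state = current_state - 1
--             if current_state < 0:
--                 current_state = 0
--         counts[current_state] = counts[current_state] + 1
--         i = i + 1
--     return counts
-- ===== SOURCE B (Python) =====
-- def count_state_visits(input_seq: list[int], num_states: int) -> list[int]:
--     """Count how many times each state was visited."""
--     # A reset (input 2) sends the machine to state 0 -- the very state a fresh
--     # run starts in.  So split the input at resets into reset-free segments,
--     # histogram each segment independently, and vector-add the histograms.
--     segs = []
--     seg = []
--     for inp in input_seq:
--         if inp == 2:
--             segs.append(seg)
--             seg = []
--         else:
--             seg.append(inp)
--     segs.append(seg)
--     total = _segment_hist(segs[0], num_states)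
--     for s in segs[1:]:
--         hist = _segment_hist(s, num_states)
--         total = [x + y for x, y in zip(total, hist)]
--     return total
--
--
-- def _segment_hist(seg: list[int], num_states: int) -> list[int]:
--     """Visit histogram of one reset-free run: a clamped +/-1 walk from state 0."""
--     hist = [0] * num_states
--     hist[0] = 1
--     cur = 0
--     for inp in seg:
--         if inp == 1:
--             cur = min(cur + 1, num_states - 1)
--         elif inp == 3:
--             cur = max(cur - 1, 0)
--         hist[cur] += 1
--     return hist
-- ===== Notes on version B (the rewrite author's own statement) =====
-- stated objective: alternative
-- what changed: A runs one interleaved index-driven while loop that simulates transitions and increments counts in place; B exploits that input 2 resets the machine to the start state: it splits the input at resets into independent reset-free segments, histograms each segment's clamped walk separately, and vector-adds the per-segment histograms.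
import Mathlib
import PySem

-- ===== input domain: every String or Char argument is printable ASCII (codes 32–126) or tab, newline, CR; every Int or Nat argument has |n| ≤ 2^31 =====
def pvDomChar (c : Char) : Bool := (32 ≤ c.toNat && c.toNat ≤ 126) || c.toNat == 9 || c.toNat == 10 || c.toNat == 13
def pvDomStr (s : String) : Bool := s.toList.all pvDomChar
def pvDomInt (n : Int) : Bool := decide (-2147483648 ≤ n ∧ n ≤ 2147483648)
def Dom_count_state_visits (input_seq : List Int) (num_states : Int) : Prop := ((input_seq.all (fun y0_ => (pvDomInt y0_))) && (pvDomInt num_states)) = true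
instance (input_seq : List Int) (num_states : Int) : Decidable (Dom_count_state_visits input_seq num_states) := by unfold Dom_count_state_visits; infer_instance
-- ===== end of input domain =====

-- B replaces A's single interleaved simulate-and-count loop by a reset-decomposition:
-- input 2 resets the machine to state 0, so B splits the input at resets, histograms
-- each reset-free segment independently, and vector-adds the histograms; same cost.

-- ===== PORT A =====
-- A's main while loop: state (counts, current_state), one step per input.
-- Indexing via .toNat is exact here: under Pre_ (num_states ≥ 1) the clamped
-- state is always in [0, num_states-1], so Python's counts[cur] never wraps/raises.
def csvLoopA (input_seq : List Int) (num_states : Int) (counts : List Int) (cur : Int) : List Int :=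
  match input_seq with
  | [] => counts
  | inp :: rest =>
    let cur1 : Int :=
      if inp = 1 then (if cur + 1 ≥ num_states then num_states - 1 else cur + 1)
      else if inp = 2 then 0
      else if inp = 3 then (if cur - 1 < 0 then 0 else cur - 1)
      else cur
    csvLoopA rest num_states (counts.set cur1.toNat (counts.getD cur1.toNat 0 + 1)) cur1

def count_state_visits (input_seq : List Int) (num_states : Int) : List Int :=
  -- first while loop: append 0 once per s in range(num_states)
  let counts0 := (PySem.List.pyRange 0 num_states 1).foldl (fun c _ => c ++ [(0 : Int)]) []
  -- counts[0] = 1 (Python raises IndexError when num_states ≤ 0; excluded by Pre_,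
  -- where List.set is a no-op)
  csvLoopA input_seq num_states (counts0.set 0 1) 0

-- ===== PORT B =====
-- B's split loop: state (segs, seg); Python's final segs.append(seg) is the ++ [cur] at the end.
def csvSplitGo (xs : List Int) (segs : List (List Int)) (cur : List Int) : List (List Int) :=
  match xs with
  | [] => segs ++ [cur]
  | inp :: rest =>
    if inp = 2 then csvSplitGo rest (segs ++ [cur]) []
    else csvSplitGo rest segs (cur ++ [inp])

-- _segment_hist's for loop: state (hist, cur).
def csvSegLoop (seg : List Int) (num_states : Int) (hist : List Int) (cur : Int) : List Int :=
  match seg with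
  | [] => hist
  | inp :: rest =>
    let cur1 : Int :=
      if inp = 1 then min (cur + 1) (num_states - 1)
      else if inp = 3 then max (cur - 1) 0
      else cur
    csvSegLoop rest num_states (hist.set cur1.toNat (hist.getD cur1.toNat 0 + 1)) cur1

def csvSegHist (seg : List Int) (num_states : Int) : List Int :=
  -- hist = [0]*num_states; hist[0] = 1 (IndexError when num_states ≤ 0, outside Pre_)
  csvSegLoop seg num_states ((List.replicate num_states.toNat (0 : Int)).set 0 1) 0

def count_state_visits_alt (input_seq : List Int) (num_states : Int) : List Int :=
  match csvSplitGo input_seq [] [] with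
  | [] => []  -- unreachable: the split always yields at least one segment (Python's segs[0])
  | s :: rest =>
    -- total = hist of segs[0]; for s in segs[1:]: total = [x+y for x,y in zip(total, hist)]
    rest.foldl (fun tot seg => List.zipWith (· + ·) tot (csvSegHist seg num_states)) (csvSegHist s num_states)

-- ===== PRECONDITION & SPEC =====
-- Pre_ excludes num_states ≤ 0, where A (counts[0] = 1 on an empty list) raises IndexError.
def Pre_count_state_visits (input_seq : List Int) (num_states : Int) : Prop := 1 ≤ num_states
instance (input_seq : List Int) (num_states : Int) : Decidable (Pre_count_state_visits input_seq num_states) := by unfold Pre_count_state_visits; infer_instance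
def pvWitness_count_state_visits : List Int × Int := ([1, 1, 3, 2, 5], 3)

def Spec_count_state_visits (input_seq : List Int) (num_states : Int) (out : List Int) : Prop := out = count_state_visits_alt input_seq num_states
instance (input_seq : List Int) (num_states : Int) (out : List Int) : Decidable (Spec_count_state_visits input_seq num_states out) := by unfold Spec_count_state_visits; infer_instance

-- ===== CLAIM =====
def Claim_equal_count_state_visits : Prop := ∀ (input_seq : List Int) (num_states : Int), Dom_count_state_visits input_seq num_states → Pre_count_state_visits input_seq num_states → Spec_count_state_visits input_seq num_states (count_state_visits input_seq num_states)

-- ===== LEMMAS AND PROOFS =====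

-- the tally step both loops perform
def csvF (c : List Int) (st : Int) : List Int := c.set st.toNat (c.getD st.toNat 0 + 1)

-- A's trajectory (states after each input), A's step written in min/max form
def csvTrajA (input_seq : List Int) (num_states : Int) (cur : Int) : List Int :=
  match input_seq with
  | [] => []
  | inp :: rest =>
    let cur1 : Int :=
      if inp = 1 then min (cur + 1) (num_states - 1)
      else if inp = 2 then 0
      else if inp = 3 then max (cur - 1) 0
      else cur
    cur1 :: csvTrajA rest num_states cur1

-- B's reset-free walk (the states csvSegLoop visits)
def csvWalkB (seg : List Int) (num_states : Int) (cur : Int) : List Int :=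
  match seg with
  | [] => []
  | inp :: rest =>
    let cur1 : Int :=
      if inp = 1 then min (cur + 1) (num_states - 1)
      else if inp = 3 then max (cur - 1) 0
      else cur
    cur1 :: csvWalkB rest num_states cur1

-- A's nested-if clamping equals the min/max clamping.
lemma csv_step_eq (inp cur num_states : Int) :
    (if inp = 1 then (if cur + 1 ≥ num_states then num_states - 1 else cur + 1)
     else if inp = 2 then 0
     else if inp = 3 then (if cur - 1 < 0 then 0 else cur - 1)
     else cur)
    = (if inp = 1 then min (cur + 1) (num_states - 1)
       else if inp = 2 then 0
       else if inp = 3 then max (cur - 1) 0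
       else cur) := by
  split_ifs with h1 h2 h3 h4 h5 <;> omega

-- A's interleaved loop = folding the tally step over A's trajectory.
lemma csvLoopA_eq_foldl (num_states : Int) :
    ∀ (l : List Int) (counts : List Int) (cur : Int),
      csvLoopA l num_states counts cur
        = (csvTrajA l num_states cur).foldl csvF counts := by
  intro l
  induction l with
  | nil => intro counts cur; rfl
  | cons inp rest ih =>
    intro counts cur
    simp only [csvLoopA, csvTrajA, List.foldl_cons, csv_step_eq, csvF]
    exact ih _ _

-- B's segment loop = folding the tally step over B's walk.
lemma csvSegLoop_eq_foldl (num_states : Int) :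
    ∀ (l : List Int) (hist : List Int) (cur : Int),
      csvSegLoop l num_states hist cur
        = (csvWalkB l num_states cur).foldl csvF hist := by
  intro l
  induction l with
  | nil => intro hist cur; rfl
  | cons inp rest ih =>
    intro hist cur
    simp only [csvSegLoop, csvWalkB, List.foldl_cons, csvF]
    exact ih _ _

-- A's zero-building while loop yields a replicate.
lemma csv_foldl_append_zero (L : List Int) :
    ∀ acc : List Int, L.foldl (fun c _ => c ++ [(0 : Int)]) acc
      = acc ++ List.replicate L.length 0 := by
  induction L with
  | nil => simp
  | cons x xs ih =>
    intro acc
    rw [List.foldl_cons, ih, List.length_cons, List.replicate_succ]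
    simp

lemma csv_counts0_eq (num_states : Int) :
    (PySem.List.pyRange 0 num_states 1).foldl (fun c _ => c ++ [(0 : Int)]) []
      = List.replicate num_states.toNat 0 := by
  rw [csv_foldl_append_zero, PySem.List.length_pyRange_one]
  simp

-- the initial counts[0] = 1 is the tally step applied to zeros
lemma csv_set_one (m : Nat) :
    (List.replicate m (0 : Int)).set 0 1 = csvF (List.replicate m (0 : Int)) 0 := by
  cases m <;> simp [csvF]

-- A as fold over the full trajectory (0 prepended)
lemma csvA_char (l : List Int) (n : Int) :
    count_state_visits l n
      = ((0 : Int) :: csvTrajA l n 0).foldl csvF (List.replicate n.toNat 0) := by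
  unfold count_state_visits
  rw [csv_counts0_eq, csvLoopA_eq_foldl, List.foldl_cons, csv_set_one]

-- segment hist as fold
lemma csvSegHist_char (seg : List Int) (n : Int) :
    csvSegHist seg n
      = ((0 : Int) :: csvWalkB seg n 0).foldl csvF (List.replicate n.toNat 0) := by
  unfold csvSegHist
  rw [csvSegLoop_eq_foldl, List.foldl_cons, csv_set_one]

-- split-loop accumulator lemma
lemma csvSplitGo_acc :
    ∀ (xs : List Int) (segs : List (List Int)) (cur : List Int),
      csvSplitGo xs segs cur = segs ++ csvSplitGo xs [] cur := by
  intro xs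
  induction xs with
  | nil => intro segs cur; simp [csvSplitGo]
  | cons inp rest ih =>
    intro segs cur
    by_cases h : inp = 2
    · simp only [csvSplitGo, if_pos h, List.nil_append]
      rw [ih (segs ++ [cur]), ih [cur], List.append_assoc]
    · simp only [csvSplitGo, if_neg h]
      rw [ih segs, ih []]

lemma csvSplitGo_no2 :
    ∀ (h : List Int) (cur : List Int), (2 : Int) ∉ h →
      csvSplitGo h [] cur = [cur ++ h] := by
  intro h
  induction h with
  | nil => intro cur _; simp [csvSplitGo]
  | cons x r ih =>
    intro cur hx
    have hx2 : x ≠ 2 := by intro e; exact hx (e ▸ List.mem_cons_self)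
    simp only [csvSplitGo, if_neg hx2]
    rw [ih _ (fun m => hx (List.mem_cons_of_mem _ m))]
    simp

lemma csvSplitGo_split (t : List Int) :
    ∀ (h cur : List Int), (2 : Int) ∉ h →
      csvSplitGo (h ++ 2 :: t) [] cur = (cur ++ h) :: csvSplitGo t [] [] := by
  intro h
  induction h with
  | nil =>
    intro cur _
    simp only [List.nil_append, csvSplitGo, reduceIte]
    rw [csvSplitGo_acc]
    simp
  | cons x r ih =>
    intro cur hh
    have hx2 : x ≠ 2 := by intro e; exact hh (e ▸ List.mem_cons_self)
    simp only [List.cons_append, csvSplitGo, if_neg hx2]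
    rw [ih _ (fun m => hh (List.mem_cons_of_mem _ m))]
    simp

-- trajectory decomposition at the first reset
lemma csvTrajA_split (n : Int) :
    ∀ (h t : List Int) (cur : Int), (2 : Int) ∉ h →
      csvTrajA (h ++ 2 :: t) n cur = csvTrajA h n cur ++ 0 :: csvTrajA t n 0 := by
  intro h
  induction h with
  | nil => intro t cur _; simp [csvTrajA]
  | cons x r ih =>
    intro t cur hh
    have hx2 : x ≠ 2 := by intro e; exact hh (e ▸ List.mem_cons_self)
    simp only [List.cons_append, csvTrajA]
    rw [ih t _ (fun m => hh (List.mem_cons_of_mem _ m))]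

-- on reset-free input the two trajectories coincide
lemma csvTrajA_eq_walkB (n : Int) :
    ∀ (l : List Int) (cur : Int), (2 : Int) ∉ l →
      csvTrajA l n cur = csvWalkB l n cur := by
  intro l
  induction l with
  | nil => intro cur _; rfl
  | cons x r ih =>
    intro cur hl
    have hx2 : x ≠ 2 := by intro e; exact hl (e ▸ List.mem_cons_self)
    simp only [csvTrajA, csvWalkB, if_neg hx2]
    rw [ih _ (fun m => hl (List.mem_cons_of_mem _ m))]

-- states visited stay in [0, n)
lemma csvTrajA_range (n : Int) (hn : 1 ≤ n) :
    ∀ (l : List Int) (cur : Int), 0 ≤ cur → cur < n →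
      ∀ st ∈ csvTrajA l n cur, 0 ≤ st ∧ st < n := by
  intro l
  induction l with
  | nil => intro cur _ _ st hst; simp [csvTrajA] at hst
  | cons x r ih =>
    intro cur h0 h1 st hst
    simp only [csvTrajA, List.mem_cons] at hst
    have hcur1 : 0 ≤ (if x = 1 then min (cur + 1) (n - 1)
        else if x = 2 then 0 else if x = 3 then max (cur - 1) 0 else cur) ∧
        (if x = 1 then min (cur + 1) (n - 1)
        else if x = 2 then 0 else if x = 3 then max (cur - 1) 0 else cur) < n := by
      split_ifs <;> omega
    rcases hst with rfl | hst
    · exact hcur1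
    · exact ih _ hcur1.1 hcur1.2 st hst

-- tally preserves length
lemma csvF_length (c : List Int) (st : Int) : (csvF c st).length = c.length := by
  simp [csvF]

lemma csv_foldl_length :
    ∀ (xs : List Int) (c : List Int), (xs.foldl csvF c).length = c.length := by
  intro xs
  induction xs with
  | nil => intro c; rfl
  | cons x r ih => intro c; rw [List.foldl_cons, ih, csvF_length]

-- adding zeros pointwise is the identity
lemma csv_zip_zero (c : List Int) :
    List.zipWith (· + ·) c (List.replicate c.length (0 : Int)) = c := by
  induction c with
  | nil => rfl
  | cons x r ih => simp [List.replicate_succ, ih]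

-- the tally step commutes with pointwise addition on the left component
lemma csvF_zipWith (u v : List Int) (st : Int)
    (hlen : u.length = v.length) (hst : st.toNat < v.length) :
    csvF (List.zipWith (· + ·) u v) st = List.zipWith (· + ·) u (csvF v st) := by
  have hstc : st.toNat < u.length := by omega
  have hz : st.toNat < (List.zipWith (· + ·) u v).length := by simp; omega
  have h1 : u.getD st.toNat 0 = u[st.toNat] := by
    rw [List.getD_eq_getElem?_getD, List.getElem?_eq_getElem hstc, Option.getD_some]
  have h2 : v.getD st.toNat 0 = v[st.toNat] := by
    rw [List.getD_eq_getElem?_getD, List.getElem?_eq_getElem hst, Option.getD_some]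
  have hgd : (List.zipWith (· + ·) u v).getD st.toNat 0
      = u.getD st.toNat 0 + v.getD st.toNat 0 := by
    rw [List.getD_eq_getElem?_getD, List.getElem?_eq_getElem hz, Option.getD_some,
        List.getElem_zipWith, h1, h2]
  apply List.ext_getElem
  · simp [csvF, hlen]
  · intro i hi1 hi2
    simp only [csvF, List.getElem_set, List.getElem_zipWith, hgd]
    by_cases h : st.toNat = i
    · subst h
      simp only [if_true, h1, h2]
      ring
    · simp [h]

-- folding the tally over a zipWith(+) pulls out on the left
lemma csv_foldl_zipWith :
    ∀ (xs : List Int) (c d : List Int), c.length = d.length →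
      (∀ st ∈ xs, st.toNat < d.length) →
      xs.foldl csvF (List.zipWith (· + ·) c d)
        = List.zipWith (· + ·) c (xs.foldl csvF d) := by
  intro xs
  induction xs with
  | nil => intro c d _ _; rfl
  | cons x r ih =>
    intro c d hlen hmem
    rw [List.foldl_cons, List.foldl_cons,
        csvF_zipWith c d x hlen (hmem x List.mem_cons_self),
        ih c (csvF d x) (by rw [csvF_length]; exact hlen)
          (by intro st hst; rw [csvF_length]; exact hmem st (List.mem_cons_of_mem _ hst))]

-- extraction form: folding over a valid trajectory from c = c + (fold from zeros)
lemma csv_foldl_extract (xs : List Int) (c : List Int)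
    (hmem : ∀ st ∈ xs, st.toNat < c.length) :
    xs.foldl csvF c
      = List.zipWith (· + ·) c (xs.foldl csvF (List.replicate c.length (0 : Int))) := by
  have h0 := csv_zip_zero c
  calc xs.foldl csvF c
      = xs.foldl csvF (List.zipWith (· + ·) c (List.replicate c.length (0 : Int))) := by rw [h0]
    _ = List.zipWith (· + ·) c (xs.foldl csvF (List.replicate c.length (0 : Int))) :=
        csv_foldl_zipWith xs c _ (by simp) (by simpa using hmem)

-- pointwise addition associates
lemma csv_zip_assoc :
    ∀ (a b c : List Int),
      List.zipWith (· + ·) (List.zipWith (· + ·) a b) c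
        = List.zipWith (· + ·) a (List.zipWith (· + ·) b c) := by
  intro a
  induction a with
  | nil => intro b c; rfl
  | cons x r ih =>
    intro b c
    cases b with
    | nil => rfl
    | cons y s =>
      cases c with
      | nil => rfl
      | cons z t => simp [ih, add_assoc]

-- a left zipWith(+) distributes over B's accumulation fold
lemma csv_zip_foldl (a : List Int) :
    ∀ (rest : List (List Int)) (b : List Int) (n : Int),
      List.zipWith (· + ·) a
          (rest.foldl (fun tot seg => List.zipWith (· + ·) tot (csvSegHist seg n)) b)
        = rest.foldl (fun tot seg => List.zipWith (· + ·) tot (csvSegHist seg n))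
            (List.zipWith (· + ·) a b) := by
  intro rest
  induction rest with
  | nil => intro b n; rfl
  | cons s r ih =>
    intro b n
    rw [List.foldl_cons, List.foldl_cons, ih, csv_zip_assoc]

-- the split never yields an empty segment list
lemma csvSplitGo_ne_nil :
    ∀ (xs : List Int) (segs : List (List Int)) (cur : List Int),
      csvSplitGo xs segs cur ≠ [] := by
  intro xs
  induction xs with
  | nil => intro segs cur; simp [csvSplitGo]
  | cons x r ih =>
    intro segs cur
    simp only [csvSplitGo]
    split_ifs <;> exact ih _ _

-- decompose a list at its first occurrence of 2
lemma csv_first_two :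
    ∀ (l : List Int), (2 : Int) ∈ l → ∃ h t, l = h ++ 2 :: t ∧ (2 : Int) ∉ h := by
  intro l
  induction l with
  | nil => intro h; simp at h
  | cons x r ih =>
    intro hmem
    by_cases hx : x = 2
    · exact ⟨[], r, by simp [hx], by simp⟩
    · have : (2 : Int) ∈ r := by
        rcases List.mem_cons.mp hmem with e | m
        · exact absurd e.symm hx
        · exact m
      obtain ⟨h, t, rfl, hh⟩ := ih this
      exact ⟨x :: h, t, by simp, by
        intro m
        rcases List.mem_cons.mp m with e | m'
        · exact hx e.symm
        · exact hh m'⟩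

-- the main equivalence, by strong induction on the input length
lemma csv_main (n : Int) (hn : 1 ≤ n) :
    ∀ (l : List Int), count_state_visits l n = count_state_visits_alt l n := by
  intro l
  induction hk : l.length using Nat.strong_induction_on generalizing l with
  | _ k ih =>
  by_cases h2 : (2 : Int) ∈ l
  · obtain ⟨h, t, rfl, hh⟩ := csv_first_two l h2
    -- A side: fold over trajectory(h) ++ 0 :: trajectory(t)
    have hA : count_state_visits (h ++ 2 :: t) n
        = List.zipWith (· + ·) (csvSegHist h n) (count_state_visits t n) := by
      rw [csvA_char, csvTrajA_split n h t 0 hh]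
      have : (0 : Int) :: (csvTrajA h n 0 ++ 0 :: csvTrajA t n 0)
          = ((0 : Int) :: csvTrajA h n 0) ++ ((0 : Int) :: csvTrajA t n 0) := by simp
      rw [this, List.foldl_append]
      have hlen : (((0 : Int) :: csvTrajA h n 0).foldl csvF
          (List.replicate n.toNat 0)).length = n.toNat := by
        rw [csv_foldl_length]; simp
      have hmem : ∀ st ∈ (0 : Int) :: csvTrajA t n 0,
          st.toNat < (((0 : Int) :: csvTrajA h n 0).foldl csvF
            (List.replicate n.toNat 0)).length := by
        intro st hst
        rw [hlen]
        rcases List.mem_cons.mp hst with rfl | hst'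
        · omega
        · have := csvTrajA_range n hn t 0 (le_refl 0) (by omega) st hst'
          omega
      rw [csv_foldl_extract _ _ hmem, hlen]
      rw [csvSegHist_char, csvTrajA_eq_walkB n h 0 hh, csvA_char]
    -- B side: split yields (h) :: split(t)
    have hB : count_state_visits_alt (h ++ 2 :: t) n
        = List.zipWith (· + ·) (csvSegHist h n) (count_state_visits_alt t n) := by
      unfold count_state_visits_alt
      rw [csvSplitGo_split t h [] hh]
      simp only [List.nil_append]
      cases hs : csvSplitGo t [] [] with
      | nil => exact absurd hs (csvSplitGo_ne_nil t [] [])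
      | cons s rest =>
        rw [List.foldl_cons, csv_zip_foldl]
    rw [hA, hB]
    congr 1
    exact ih t.length (by simp at hk; omega) t rfl
  · -- reset-free input: one segment
    rw [csvA_char]
    unfold count_state_visits_alt
    rw [csvSplitGo_no2 l [] h2]
    simp only [List.nil_append, List.foldl_nil]
    rw [csvSegHist_char, csvTrajA_eq_walkB n l 0 h2]

-- ===== VERDICT =====
theorem count_state_visits_spec : Claim_equal_count_state_visits := by
  intro input_seq num_states _ hpre
  unfold Spec_count_state_visits
  exact csv_main num_states hpre input_seq
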